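-- pv_equiv track=rewrite | github.com/Amal-Hamza1996/coding_game_python | coding_game.py | inverser_special_char
-- ===== SOURCE A (Python) =====
-- def inverser_special_char(word):
--     res_list = []
--     res = ""
--     n = len(word)
--     list_word = [word[i] for i in range(n)]
--     carac_special_index = [i for i in range(0, n) if not(word[i].isalnum())]
--     for i in range(n):
--         if (n-1-i) not in carac_special_index:
--             res_list.append(word[n-1-i])
--     for e in carac_special_index:
--         res_list.insert(e, word[e])
--     for elt in res_list:
--         res+=elt
--     return res
-- ===== SOURCE B (Python) =====
-- def inverser_special_char(word):
--     rev = [c for c in reversed(word) if c.isalnum()]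
--     out = []
--     j = 0
--     for c in word:
--         if c.isalnum():
--             out.append(rev[j])
--             j += 1
--         else:
--             out.append(c)
--     return "".join(out)
-- ===== Notes on version B (the rewrite author's own statement) =====
-- stated objective: faster
-- what changed: A builds a list of special-char indices, tests membership in it for every position and re-inserts specials by positional list.insert (quadratic); B makes one pass over the word, emitting the next element of a precomputed reversed-alphanumeric list at alnum positions and the original char elsewhere.
import Mathlib
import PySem

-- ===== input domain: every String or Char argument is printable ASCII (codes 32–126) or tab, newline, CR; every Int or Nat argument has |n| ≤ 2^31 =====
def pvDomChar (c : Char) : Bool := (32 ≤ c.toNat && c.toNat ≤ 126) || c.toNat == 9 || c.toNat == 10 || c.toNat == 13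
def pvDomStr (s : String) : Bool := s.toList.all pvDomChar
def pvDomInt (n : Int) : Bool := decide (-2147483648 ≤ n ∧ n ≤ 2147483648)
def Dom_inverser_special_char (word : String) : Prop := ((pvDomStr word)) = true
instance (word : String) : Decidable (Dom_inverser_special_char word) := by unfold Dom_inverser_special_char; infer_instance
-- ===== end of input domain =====

-- B reverses the alphanumeric characters in ONE pass that consumes a precomputed reversed-alnum
-- list, replacing A's quadratic index-list membership tests and positional inserts (objective: faster).

-- ===== PORT A =====
-- word[i] for the in-range non-negative indices A uses (exact there)
def pvAt (cs : List Char) (i : Nat) : Char := cs.getD i ' '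

-- carac_special_index = [i for i in range(0, n) if not word[i].isalnum()]
def specIdx (cs : List Char) : List Nat :=
  (List.range cs.length).filter (fun i => !(PySem.Chars.isalnum (pvAt cs i)))

def inverser_special_char (word : String) : String :=
  let cs := word.toList
  let n := cs.length
  let _list_word := (List.range n).map (fun i => pvAt cs i)  -- built and unused, as in A
  let spec := specIdx cs
  -- for i in range(n): if (n-1-i) not in carac_special_index: res_list.append(word[n-1-i])
  let res_list := (List.range n).foldl
    (fun acc i => if !(spec.contains (n - 1 - i)) then acc ++ [pvAt cs (n - 1 - i)] else acc) []
  -- for e in carac_special_index: res_list.insert(e, word[e])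
  let res_list2 := spec.foldl (fun acc (e : Nat) => PySem.List.insert acc (e : Int) (pvAt cs e)) res_list
  -- for elt in res_list: res += elt   (string concatenation ported at the char-list level, exact)
  let res := res_list2.foldl (fun r elt => r ++ [elt]) []
  String.mk res

-- ===== PORT B =====
-- rev = [c for c in reversed(word) if c.isalnum()]
def revAlnum (cs : List Char) : List Char :=
  cs.reverse.filter (fun c => PySem.Chars.isalnum c)

-- the for-loop over word; Source B's index pointer j into rev is represented by the remaining
-- suffix rev[j:] (j only ever increments by 1, so this is the same traversal; the [] branch
-- is Source B's rev[j] IndexError, unreachable since rev holds exactly the alnum chars of word)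
def altLoop : List Char → List Char → List Char
  | [], _ => []
  | c :: t, r =>
    if PySem.Chars.isalnum c then
      match r with
      | x :: rt => x :: altLoop t rt
      | [] => []
    else c :: altLoop t r

def inverser_special_char_alt (word : String) : String :=
  let cs := word.toList
  String.mk (altLoop cs (revAlnum cs))

-- ===== PRECONDITION & SPEC =====
def Spec_inverser_special_char (word : String) (out : String) : Prop := out = inverser_special_char_alt word
instance (word : String) (out : String) : Decidable (Spec_inverser_special_char word out) := by unfold Spec_inverser_special_char; infer_instance

-- ===== CLAIM (what is proved, stated in full; the proofs are below) =====
def Claim_equal_inverser_special_char : Prop := ∀ (word : String), Dom_inverser_special_char word → Spec_inverser_special_char word (inverser_special_char word)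

-- ===== LEMMAS AND PROOFS =====

theorem insert_clamp (xs : List Char) (e : Nat) (v : Char) :
    PySem.List.insert xs (e : Int) v = xs.take e ++ v :: xs.drop e := by
  by_cases h : e ≤ xs.length
  · exact PySem.List.insert_natCast xs e v h
  · have h1 : xs.take e = xs := List.take_of_length_le (by omega)
    have h2 : xs.drop e = [] := List.drop_of_length_le (by omega)
    have ht : ((min (e : Int) (xs.length : Int))).toNat = xs.length := by omega
    simp [PySem.List.insert, PySem.List.sliceIndices, h1, h2]
    rw [if_neg (by omega : ¬((e : Int) < 0)), ht]
    simp

theorem insert_cons (acc : List Char) (e : Nat) (v c : Char) :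
    PySem.List.insert (c :: acc) ((e : Int) + 1) v = c :: PySem.List.insert acc (e : Int) v := by
  have : ((e : Int) + 1) = ((e + 1 : Nat) : Int) := by omega
  rw [this, insert_clamp, insert_clamp]
  simp

theorem mem_specIdx (cs : List Char) (j : Nat) :
    j ∈ specIdx cs ↔ j < cs.length ∧ ¬ PySem.Chars.isalnum (pvAt cs j) := by
  simp [specIdx, List.mem_filter, List.mem_range]

theorem map_rev (cs : List Char) :
    (List.range cs.length).map (fun i => pvAt cs (cs.length - 1 - i)) = cs.reverse := by
  apply List.ext_getElem
  · simp
  · intro i h1 h2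
    simp only [List.getElem_map, List.getElem_range, List.getElem_reverse]
    simp only [List.length_map, List.length_range] at h1
    simp [pvAt, List.getD_eq_getElem?_getD, List.getElem?_eq_getElem (by omega : cs.length - 1 - i < cs.length)]

theorem resList_eq (cs : List Char) :
    (List.range cs.length).foldl
      (fun acc i => if !((specIdx cs).contains (cs.length - 1 - i)) then
          acc ++ [pvAt cs (cs.length - 1 - i)] else acc) []
      = revAlnum cs := by
  rw [PySem.List.foldl_congr_mem
      (g := fun acc i => if PySem.Chars.isalnum (pvAt cs (cs.length - 1 - i)) then
          acc ++ [pvAt cs (cs.length - 1 - i)] else acc)]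
  · rw [PySem.List.foldl_append_if (p := fun i => PySem.Chars.isalnum (pvAt cs (cs.length - 1 - i)))
        (f := fun i => pvAt cs (cs.length - 1 - i))]
    rw [revAlnum, ← map_rev cs, List.filter_map]
    simp [Function.comp_def]
  · intro acc i hi
    simp only [List.mem_range] at hi
    have hlt : cs.length - 1 - i < cs.length := by omega
    have : ((specIdx cs).contains (cs.length - 1 - i))
        = !(PySem.Chars.isalnum (pvAt cs (cs.length - 1 - i))) := by
      cases h : PySem.Chars.isalnum (pvAt cs (cs.length - 1 - i)) with
      | false => simp [h, mem_specIdx]; omega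
      | true => simp [h, mem_specIdx]
    rw [this]
    simp

theorem specIdx_cons (c : Char) (t : List Char) :
    specIdx (c :: t)
      = (if PySem.Chars.isalnum c then [] else [0]) ++ (specIdx t).map (· + 1) := by
  simp only [specIdx, List.length_cons, List.range_succ_eq_map, List.filter_cons, List.filter_map]
  cases h : PySem.Chars.isalnum c with
  | false => simp [h, pvAt, Function.comp_def]
  | true => simp [h, pvAt, Function.comp_def]

theorem fold_ins_cons (g : Nat → Char) (S : List Nat) (x : Char) (acc : List Char) :
    S.foldl (fun a (e : Nat) => PySem.List.insert a ((e : Int) + 1) (g e)) (x :: acc)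
      = x :: S.foldl (fun a (e : Nat) => PySem.List.insert a (e : Int) (g e)) acc := by
  induction S generalizing acc with
  | nil => rfl
  | cons e S ih => simp only [List.foldl_cons, insert_cons]; exact ih _

theorem insPhase (cs : List Char) : ∀ (r : List Char),
    r.length = (cs.filter (fun c => PySem.Chars.isalnum c)).length →
    (specIdx cs).foldl (fun acc (e : Nat) => PySem.List.insert acc (e : Int) (pvAt cs e)) r
      = altLoop cs r := by
  induction cs with
  | nil =>
    intro r hr
    simp only [List.filter_nil, List.length_nil, List.length_eq_zero_iff] at hr
    subst hr; rfl
  | cons c t ih =>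
    intro r hr
    rw [specIdx_cons]
    have hfold : ∀ (a : List Char),
        ((specIdx t).map (· + 1)).foldl
          (fun acc (e : Nat) => PySem.List.insert acc (e : Int) (pvAt (c :: t) e)) a
        = (specIdx t).foldl (fun acc (e : Nat) => PySem.List.insert acc ((e : Int) + 1) (pvAt t e)) a := by
      intro a
      rw [List.foldl_map]
      apply PySem.List.foldl_congr_mem
      intro acc e _
      have h1 : (((e + 1 : Nat) : Int)) = (e : Int) + 1 := by omega
      have h2 : pvAt (c :: t) (e + 1) = pvAt t e := by simp [pvAt]
      simp only [h1, h2]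
    cases h : PySem.Chars.isalnum c with
    | false =>
      -- c is special: insert at 0 first, then shifted inserts
      simp only [Bool.false_eq_true, if_false, List.singleton_append, List.foldl_cons]
      rw [insert_clamp]
      simp only [List.take_zero, List.drop_zero, List.nil_append]
      rw [hfold, fold_ins_cons, ih r (by simpa [h] using hr)]
      simp [altLoop, h, pvAt]
    | true =>
      -- c is alphanumeric: r is nonempty
      simp only [if_true, List.nil_append]
      simp only [h, List.filter_cons_of_pos, List.length_cons] at hr
      rcases r with _ | ⟨x, rt⟩
      · simp at hr
      · rw [hfold, fold_ins_cons, ih rt (by simpa using hr)]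
        simp [altLoop, h]

theorem length_revAlnum (cs : List Char) :
    (revAlnum cs).length = (cs.filter (fun c => PySem.Chars.isalnum c)).length := by
  simp [revAlnum, List.filter_reverse]

-- ===== VERDICT (by name: the statement is the Claim_ definition above) =====
theorem inverser_special_char_spec : Claim_equal_inverser_special_char := by
  intro word _
  unfold Spec_inverser_special_char inverser_special_char inverser_special_char_alt
  simp only
  rw [PySem.List.foldl_append_singleton_eq_self, List.nil_append,
      resList_eq, insPhase word.toList (revAlnum word.toList) (length_revAlnum word.toList)]
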